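-- pv_equiv track=rewrite | github.com/xingcdev/efrei-python-automate-fini | src/deterministe.py | completer
-- ===== SOURCE A (Python) =====
-- def completer(alphabet, etats, transitions, table_transitions):
--     """ Complète un automate
--
--     :param alphabet: Alphabet du langage
--     :param etats: Liste des états
--     :param transitions: Liste des transitions [source,symbole,destination]
--     :param table_transitions: Table de transitions
--     :return: Nouvelles listes d'états et de transitions
--     """
--     junk_state = 'P'
--     junk_state_added = False
--
--     for ligne in range(len(table_transitions)):
--         for colonne in range(len(table_transitions[ligne])):
--             if table_transitions[ligne][colonne] == " ":
--                 if not junk_state_added: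
--                     etats.append(junk_state)
--                     for i in range(len(alphabet)):
--                         transitions.append(junk_state + ',' + alphabet[i] + ',' + junk_state)
--                     junk_state_added = True
--                 transitions.append(etats[ligne] + ',' + alphabet[colonne] + ',' + junk_state)
--     return etats, transitions
-- ===== SOURCE B (Python) =====
-- def completer(alphabet, etats, transitions, table_transitions):
--     # Detect-then-emit: collect empty cells first, then do all appends once.
--     cells = [(l, c)
--              for l in range(len(table_transitions))
--              for c in range(len(table_transitions[l]))
--              if table_transitions[l][c] == " "]
--     if cells:
--         etats.append('P')
--         for a in alphabet:
--             transitions.append('P,' + a + ',P')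
--         for l, c in cells:
--             transitions.append(etats[l] + ',' + alphabet[c] + ',P')
--     return etats, transitions
-- ===== Notes on version B (the rewrite author's own statement) =====
-- stated objective: simpler
-- what changed: B separates detection from emission: one comprehension collects the coordinates of all empty cells, then (if any) the junk state, the self-loops and the cell transitions are appended in three straight-line steps, dropping A's junk_state_added flag and the inner conditional append logic.
import Mathlib
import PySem

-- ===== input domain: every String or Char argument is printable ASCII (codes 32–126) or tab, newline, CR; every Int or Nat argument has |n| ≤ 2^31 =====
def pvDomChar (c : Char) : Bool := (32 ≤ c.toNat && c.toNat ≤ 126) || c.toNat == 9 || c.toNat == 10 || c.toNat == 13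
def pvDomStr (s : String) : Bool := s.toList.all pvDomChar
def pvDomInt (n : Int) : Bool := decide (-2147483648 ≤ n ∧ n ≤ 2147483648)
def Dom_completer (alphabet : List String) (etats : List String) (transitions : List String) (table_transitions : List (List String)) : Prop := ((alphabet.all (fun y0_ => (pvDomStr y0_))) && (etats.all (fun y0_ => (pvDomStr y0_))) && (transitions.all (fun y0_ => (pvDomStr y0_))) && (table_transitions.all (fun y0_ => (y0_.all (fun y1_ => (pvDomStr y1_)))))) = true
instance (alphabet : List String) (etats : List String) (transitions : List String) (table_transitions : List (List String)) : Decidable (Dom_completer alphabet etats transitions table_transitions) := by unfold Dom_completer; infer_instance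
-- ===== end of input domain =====

-- B collects the empty cells first and does all appends afterwards; no junk flag. Objective: simpler.
-- A mutates etats/transitions in place; B performs the same mutations; the theorems are about the return value.

-- ===== PORT A =====
-- Literal port of A: nested loops over row/column indices with a junk_state_added flag in the state.
def completer (alphabet : List String) (etats : List String) (transitions : List String) (table_transitions : List (List String)) : List String × List String :=
  let st :=
    (List.range table_transitions.length).foldl
      (fun st ligne =>
        (List.range (table_transitions.getD ligne []).length).foldl
          (fun (st : List String × List String × Bool) colonne =>
            if (table_transitions.getD ligne []).getD colonne "" = " " then
              match st with
              | (e, t, j) =>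
                if j then
                  (e, t ++ [e.getD ligne "" ++ "," ++ alphabet.getD colonne "" ++ "," ++ "P"], true)
                else
                  let e' := e ++ ["P"]
                  let t' := t ++ alphabet.map (fun a => "P" ++ "," ++ a ++ "," ++ "P")
                  (e', t' ++ [e'.getD ligne "" ++ "," ++ alphabet.getD colonne "" ++ "," ++ "P"], true)
            else st)
          st)
      (etats, transitions, false)
  (st.1, st.2.1)

-- ===== PORT B =====
-- Port of B: collect the coordinates of all " " cells, then, if any, emit everything at once.
def completer_alt (alphabet : List String) (etats : List String) (transitions : List String) (table_transitions : List (List String)) : List String × List String :=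
  let cells :=
    (List.range table_transitions.length).flatMap (fun l =>
      (((List.range (table_transitions.getD l []).length).filter
          (fun c => (table_transitions.getD l []).getD c "" == " ")).map (fun c => (l, c))))
  if cells.isEmpty then (etats, transitions)
  else
    let e := etats ++ ["P"]
    (e, transitions ++ alphabet.map (fun a => "P," ++ a ++ ",P")
          ++ cells.map (fun lc => e.getD lc.1 "" ++ "," ++ alphabet.getD lc.2 "" ++ ",P"))

-- ===== PRECONDITION & SPEC =====
-- Pre_ excludes exactly the inputs on which A raises IndexError: a " " cell whose row index
-- exceeds len(etats) (after 'P' is appended) or whose column index exceeds len(alphabet).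
-- (B raises IndexError on exactly the same inputs.)
def Pre_completer (alphabet : List String) (etats : List String) (transitions : List String) (table_transitions : List (List String)) : Prop :=
  ∀ l, ∀ _ : l < table_transitions.length, ∀ c, ∀ _ : c < (table_transitions.getD l []).length,
    (table_transitions.getD l []).getD c "" = " " → l < etats.length + 1 ∧ c < alphabet.length
instance (alphabet : List String) (etats : List String) (transitions : List String) (table_transitions : List (List String)) : Decidable (Pre_completer alphabet etats transitions table_transitions) := by unfold Pre_completer; infer_instance

def pvWitness_completer : List String × List String × List String × List (List String) :=
  (["a"], ["A"], [], [[" "]])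

def Spec_completer (alphabet : List String) (etats : List String) (transitions : List String) (table_transitions : List (List String)) (out : List String × List String) : Prop := out = completer_alt alphabet etats transitions table_transitions
instance (alphabet : List String) (etats : List String) (transitions : List String) (table_transitions : List (List String)) (out : List String × List String) : Decidable (Spec_completer alphabet etats transitions table_transitions out) := by unfold Spec_completer; infer_instance

-- ===== CLAIM (what is proved, stated in full; the proofs are below) =====
def Claim_equal_completer : Prop := ∀ (alphabet : List String) (etats : List String) (transitions : List String) (table_transitions : List (List String)), Dom_completer alphabet etats transitions table_transitions → Pre_completer alphabet etats transitions table_transitions → Spec_completer alphabet etats transitions table_transitions (completer alphabet etats transitions table_transitions)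

-- ===== LEMMAS AND PROOFS =====

-- The cell-level action A performs on its state, once the " " test has been factored out.
def pvAct (alphabet : List String) (st : List String × List String × Bool) (lc : Nat × Nat) : List String × List String × Bool :=
  match st with
  | (e, t, j) =>
    if j then
      (e, t ++ [e.getD lc.1 "" ++ "," ++ alphabet.getD lc.2 "" ++ "," ++ "P"], true)
    else
      let e' := e ++ ["P"]
      let t' := t ++ alphabet.map (fun a => "P" ++ "," ++ a ++ "," ++ "P")
      (e', t' ++ [e'.getD lc.1 "" ++ "," ++ alphabet.getD lc.2 "" ++ "," ++ "P"], true)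

-- Once the flag is true, the fold only appends one transition per cell.
theorem pvAct_true (alphabet : List String) (e t : List String) (cells : List (Nat × Nat)) :
    cells.foldl (pvAct alphabet) (e, t, true)
      = (e, t ++ cells.map (fun lc => e.getD lc.1 "" ++ "," ++ alphabet.getD lc.2 "" ++ "," ++ "P"), true) := by
  induction cells generalizing t with
  | nil => simp
  | cons hd tl ih => simp [pvAct, ih, List.append_assoc]

-- A's nested conditional fold is the fold of pvAct over the collected cells.
theorem completer_eq_foldl_cells (alphabet : List String) (etats : List String) (transitions : List String) (table_transitions : List (List String)) :
    completer alphabet etats transitions table_transitions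
      = (let cells :=
           (List.range table_transitions.length).flatMap (fun l =>
             (((List.range (table_transitions.getD l []).length).filter
                 (fun c => (table_transitions.getD l []).getD c "" == " ")).map (fun c => (l, c))))
         let st := cells.foldl (pvAct alphabet) (etats, transitions, false)
         (st.1, st.2.1)) := by
  simp only [completer]
  refine congrArg (fun st : List String × List String × Bool => (st.1, st.2.1)) ?_
  simp only [List.foldl_flatMap, List.foldl_map, List.foldl_filter]
  refine congrFun (congrFun (congrArg List.foldl ?_) _) _
  funext st ligne
  refine congrFun (congrFun (congrArg List.foldl ?_) _) _
  funext st' c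
  simp only [beq_iff_eq]
  split <;> simp [pvAct]

theorem completer_spec' (alphabet : List String) (etats : List String) (transitions : List String) (table_transitions : List (List String)) :
    completer alphabet etats transitions table_transitions = completer_alt alphabet etats transitions table_transitions := by
  rw [completer_eq_foldl_cells]
  simp only [completer_alt]
  set cells :=
    (List.range table_transitions.length).flatMap (fun l =>
      (((List.range (table_transitions.getD l []).length).filter
          (fun c => (table_transitions.getD l []).getD c "" == " ")).map (fun c => (l, c)))) with hc
  clear_value cells
  cases cells with
  | nil => simp
  | cons hd tl =>
    rw [if_neg (by simp)]
    simp only [List.foldl_cons]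
    have : pvAct alphabet (etats, transitions, false) hd
        = (etats ++ ["P"],
           (transitions ++ alphabet.map (fun a => "P" ++ "," ++ a ++ "," ++ "P"))
             ++ [(etats ++ ["P"]).getD hd.1 "" ++ "," ++ alphabet.getD hd.2 "" ++ "," ++ "P"], true) := by
      simp [pvAct]
    rw [this, pvAct_true]
    have hP : ∀ s : String, s ++ "," ++ "P" = s ++ ",P" := fun s => by
      rw [String.append_assoc]; rfl
    simp [List.append_assoc, hP]

-- ===== VERDICT (by name: the statement is the Claim_ definition above) =====
theorem completer_spec : Claim_equal_completer := by
  intro alphabet etats transitions table_transitions _ _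
  exact completer_spec' alphabet etats transitions table_transitions
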